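-- pv_equiv track=rewrite | github.com/cabaniasriocuarto/Bot-Trading-IA | rtlab_autotrader/rtlab_core/backtest/validation.py | purged_cv_splits
-- ===== SOURCE A (Python) =====
-- def purged_cv_splits(n_samples: int, n_splits: int, embargo: int) -> list[tuple[list[int], list[int]]]:
--     if n_splits <= 1:
--         raise ValueError("n_splits must be > 1")
--     fold_size = n_samples // n_splits
--     splits: list[tuple[list[int], list[int]]] = []
--
--     for fold in range(n_splits):
--         test_start = fold * fold_size
--         test_end = n_samples if fold == n_splits - 1 else (fold + 1) * fold_size
--         test_idx = list(range(test_start, test_end))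
--
--         train_idx = [i for i in range(n_samples) if i < test_start - embargo or i >= test_end + embargo]
--         splits.append((train_idx, test_idx))
--     return splits
-- ===== SOURCE B (Python) =====
-- def purged_cv_splits(n_samples: int, n_splits: int, embargo: int) -> list[tuple[list[int], list[int]]]:
--     if n_splits <= 1:
--         raise ValueError("n_splits must be > 1")
--     fold_size = n_samples // n_splits
--     # precompute all fold boundaries once, then build each split from an adjacent pair
--     bounds = [k * fold_size for k in range(n_splits)] + [n_samples]
--
--     def fold_pair(s: int, e: int) -> tuple[list[int], list[int]]:
--         cut = min(max(s - embargo, 0), n_samples)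
--         train = list(range(cut)) + list(range(max(cut, e + embargo), n_samples))
--         return (train, list(range(s, e)))
--
--     return [fold_pair(s, e) for s, e in zip(bounds, bounds[1:])]
-- ===== Notes on version B (the rewrite author's own statement) =====
-- stated objective: alternative
-- what changed: B precomputes the fold boundary list once and maps a pair-builder over zip(bounds, bounds[1:]), constructing each train set directly as the two kept contiguous ranges instead of A's per-fold scan of range(n_samples) with an embargo predicate (A's per-fold if for the last fold also disappears into the boundary list).
import Mathlib
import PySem

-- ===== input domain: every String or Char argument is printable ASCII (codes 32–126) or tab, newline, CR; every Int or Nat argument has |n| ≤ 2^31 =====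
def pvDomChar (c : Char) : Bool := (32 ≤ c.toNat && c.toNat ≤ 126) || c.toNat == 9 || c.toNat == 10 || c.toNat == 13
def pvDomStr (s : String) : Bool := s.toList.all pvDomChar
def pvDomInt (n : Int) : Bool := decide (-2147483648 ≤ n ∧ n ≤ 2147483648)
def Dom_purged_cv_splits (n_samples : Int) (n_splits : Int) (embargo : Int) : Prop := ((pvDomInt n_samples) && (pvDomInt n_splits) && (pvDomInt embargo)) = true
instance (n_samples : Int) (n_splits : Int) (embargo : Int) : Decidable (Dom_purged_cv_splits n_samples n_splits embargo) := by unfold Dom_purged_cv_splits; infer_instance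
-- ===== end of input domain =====

-- B precomputes the fold-boundary list and maps a pair-builder over its adjacent pairs,
-- building each train set as the two kept contiguous ranges instead of a per-index scan.

-- ===== PORT A =====
def purged_cv_splits (n_samples : Int) (n_splits : Int) (embargo : Int) : List (List Int × List Int) :=
  let fold_size := PySem.Int.floordiv n_samples n_splits
  (PySem.List.pyRange 0 n_splits 1).foldl (fun splits fold =>
    let test_start := fold * fold_size
    let test_end := if fold = n_splits - 1 then n_samples else (fold + 1) * fold_size
    let test_idx := PySem.List.pyRange test_start test_end 1
    let train_idx := (PySem.List.pyRange 0 n_samples 1).filter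
      (fun i => decide (i < test_start - embargo) || decide (test_end + embargo ≤ i))
    splits ++ [(train_idx, test_idx)]) []

-- ===== PORT B =====
def pvFoldPair (n_samples : Int) (embargo : Int) (s : Int) (e : Int) : List Int × List Int :=
  let cut := min (max (s - embargo) 0) n_samples
  let train := PySem.List.pyRange 0 cut 1 ++ PySem.List.pyRange (max cut (e + embargo)) n_samples 1
  (train, PySem.List.pyRange s e 1)

def purged_cv_splits_alt (n_samples : Int) (n_splits : Int) (embargo : Int) : List (List Int × List Int) :=
  let fold_size := PySem.Int.floordiv n_samples n_splits
  let bounds := (PySem.List.pyRange 0 n_splits 1).map (· * fold_size) ++ [n_samples]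
  (bounds.zip (PySem.List.slice bounds (some 1) none)).map
    (fun p => pvFoldPair n_samples embargo p.1 p.2)

-- ===== PRECONDITION & SPEC =====
-- Pre_ excludes exactly n_splits ≤ 1, where the Python A raises ValueError("n_splits must be > 1") (B raises the same).
def Pre_purged_cv_splits (n_samples : Int) (n_splits : Int) (embargo : Int) : Prop := 2 ≤ n_splits
instance (n_samples : Int) (n_splits : Int) (embargo : Int) : Decidable (Pre_purged_cv_splits n_samples n_splits embargo) := by unfold Pre_purged_cv_splits; infer_instance
def pvWitness_purged_cv_splits : Int × Int × Int := (10, 3, 1)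

def Spec_purged_cv_splits (n_samples : Int) (n_splits : Int) (embargo : Int) (out : List (List Int × List Int)) : Prop := out = purged_cv_splits_alt n_samples n_splits embargo
instance (n_samples : Int) (n_splits : Int) (embargo : Int) (out : List (List Int × List Int)) : Decidable (Spec_purged_cv_splits n_samples n_splits embargo out) := by unfold Spec_purged_cv_splits; infer_instance

-- ===== CLAIM =====
def Claim_equal_purged_cv_splits : Prop := ∀ (n_samples : Int) (n_splits : Int) (embargo : Int), Dom_purged_cv_splits n_samples n_splits embargo → Pre_purged_cv_splits n_samples n_splits embargo → Spec_purged_cv_splits n_samples n_splits embargo (purged_cv_splits n_samples n_splits embargo)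

-- ===== LEMMAS AND PROOFS =====

-- Core fact: the per-index scan of [0, n) with predicate "i < A or i ≥ B" lists exactly
-- the two contiguous segments [0, cut) and [max cut B, n), where cut clamps A to [0, n].
theorem filter_range_eq_two_segments (n A B : Int) :
    (PySem.List.pyRange 0 n 1).filter (fun i => decide (i < A) || decide (B ≤ i)) =
      PySem.List.pyRange 0 (min (max A 0) n) 1 ++
        PySem.List.pyRange (max (min (max A 0) n) B) n 1 := by
  by_cases hn : n ≤ 0
  · rw [PySem.List.pyRange_one_eq_nil hn, PySem.List.pyRange_one_eq_nil (by omega),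
      PySem.List.pyRange_one_eq_nil (by omega)]
    rfl
  · have h0 : (0:Int) ≤ n := by omega
    clear hn
    induction n, h0 using Int.le_induction with
    | base =>
      rw [PySem.List.pyRange_one_eq_nil le_rfl, PySem.List.pyRange_one_eq_nil (by omega),
        PySem.List.pyRange_one_eq_nil (by omega)]
      rfl
    | succ n hn ih =>
      rw [PySem.List.pyRange_one_succ_right hn, List.filter_append, ih]
      by_cases hA : n < A
      · have hc' : min (max A 0) (n + 1) = n + 1 := by omega
        have hc : min (max A 0) n = n := by omega
        rw [hc', hc, PySem.List.pyRange_one_eq_nil (show n ≤ max n B by omega),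
          PySem.List.pyRange_one_eq_nil (show n + 1 ≤ max (n+1) B by omega),
          PySem.List.pyRange_one_succ_right hn]
        simp [hA]
      · have hc : min (max A 0) (n + 1) = max A 0 := by omega
        have hc' : min (max A 0) n = max A 0 := by omega
        rw [hc, hc']
        by_cases hB : B ≤ n
        · rw [PySem.List.pyRange_one_succ_right (show max (max A 0) B ≤ n by omega)]
          simp [hA, hB]
        · rw [PySem.List.pyRange_one_eq_nil (show n ≤ max (max A 0) B by omega),
            PySem.List.pyRange_one_eq_nil (show n + 1 ≤ max (max A 0) B by omega)]
          simp [hA, hB]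

-- Zipping the boundary list with its tail yields the (start, end) pair of every fold,
-- with the arbitrary last element z as the final fold's end.
theorem zip_bounds_tail (fs z : Int) :
    ∀ (k : Nat) (a m : Int), m ≤ a + k →
      (((PySem.List.pyRange a m 1).map (· * fs) ++ [z]).zip
        ((PySem.List.pyRange a m 1).map (· * fs) ++ [z]).tail)
        = (PySem.List.pyRange a m 1).map
            (fun j => (j * fs, if j = m - 1 then z else (j + 1) * fs)) := by
  intro k
  induction k with
  | zero =>
    intro a m h
    rw [PySem.List.pyRange_one_eq_nil (by omega)]
    rfl
  | succ k ih =>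
    intro a m h
    by_cases ham : a < m
    · by_cases h1 : m ≤ a + 1
      · have hm : m = a + 1 := by omega
        subst hm
        rw [PySem.List.pyRange_one_cons ham, PySem.List.pyRange_one_eq_nil le_rfl]
        simp
      · have ihv := ih (a + 1) m (by omega)
        rw [PySem.List.pyRange_one_cons ham]
        rw [PySem.List.pyRange_one_cons (show a + 1 < m by omega)] at ihv ⊢
        simp only [List.map_cons, List.cons_append, List.tail_cons, List.zip_cons_cons] at ihv ⊢
        rw [ihv]
        have : ¬ (a = m - 1) := by omega
        simp [this]
    · rw [PySem.List.pyRange_one_eq_nil (by omega)]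
      rfl

-- ===== VERDICT =====
theorem purged_cv_splits_spec : Claim_equal_purged_cv_splits := by
  intro n_samples n_splits embargo _ hpre
  unfold Spec_purged_cv_splits purged_cv_splits purged_cv_splits_alt
  dsimp only
  rw [PySem.List.foldl_append_singleton_eq_map, PySem.List.slice_from_one,
    zip_bounds_tail (PySem.Int.floordiv n_samples n_splits) n_samples n_splits.toNat 0 n_splits
      (by omega), List.map_map]
  apply List.map_congr_left
  intro fold _
  unfold pvFoldPair
  dsimp only [Function.comp]
  rw [filter_range_eq_two_segments]
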